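-- pv_equiv track=rewrite | github.com/lordjuacs/ICC-Trabajos | Ciclo 1/Examen/9puntaje_partidos.py | puntaje
-- ===== SOURCE A (Python) =====
-- def puntaje(lista, ganado = 3, empate = 1):
--     puntaje = 0
--     for i in lista:
--         if i == "G":
--             puntaje += ganado
--         elif i == "E":
--             puntaje += empate
--     return puntaje
-- ===== SOURCE B (Python) =====
-- def puntaje(lista, ganado=3, empate=1):
--     return ganado * lista.count("G") + empate * lista.count("E")
-- ===== Notes on version B (the rewrite author's own statement) =====
-- stated objective: simpler
-- what changed: Replaces the branching accumulator loop with a closed-form expression: two count scans (one per symbol) combined arithmetically.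
import Mathlib
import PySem

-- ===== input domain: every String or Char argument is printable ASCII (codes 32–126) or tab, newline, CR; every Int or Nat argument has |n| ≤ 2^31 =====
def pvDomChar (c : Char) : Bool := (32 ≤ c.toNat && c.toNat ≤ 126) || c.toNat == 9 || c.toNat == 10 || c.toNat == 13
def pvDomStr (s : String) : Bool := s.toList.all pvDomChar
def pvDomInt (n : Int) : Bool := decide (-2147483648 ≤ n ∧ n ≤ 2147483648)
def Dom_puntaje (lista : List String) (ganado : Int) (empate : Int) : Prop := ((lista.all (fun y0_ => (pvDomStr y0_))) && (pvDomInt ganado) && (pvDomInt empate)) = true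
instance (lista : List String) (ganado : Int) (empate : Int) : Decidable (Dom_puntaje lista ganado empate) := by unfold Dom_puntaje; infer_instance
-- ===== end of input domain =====

-- ===== PORT A =====
def puntaje (lista : List String) (ganado : Int) (empate : Int) : Int :=
  lista.foldl (fun p i => if i == "G" then p + ganado else if i == "E" then p + empate else p) 0

-- ===== PORT B =====
def puntaje_alt (lista : List String) (ganado : Int) (empate : Int) : Int :=
  ganado * PySem.List.count lista "G" + empate * PySem.List.count lista "E"

-- ===== PRECONDITION & SPEC =====
def Spec_puntaje (lista : List String) (ganado : Int) (empate : Int) (out : Int) : Prop := out = puntaje_alt lista ganado empate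
instance (lista : List String) (ganado : Int) (empate : Int) (out : Int) : Decidable (Spec_puntaje lista ganado empate out) := by unfold Spec_puntaje; infer_instance

-- ===== CLAIM (what is proved, stated in full; the proofs are below) =====
def Claim_equal_puntaje : Prop := ∀ (lista : List String) (ganado : Int) (empate : Int), Dom_puntaje lista ganado empate → Spec_puntaje lista ganado empate (puntaje lista ganado empate)

-- ===== LEMMAS AND PROOFS =====

-- ===== VERDICT (by name: the statement is the Claim_ definition above) =====
theorem puntaje_step (lista : List String) (ganado empate acc : Int) :
    lista.foldl (fun p i => if i == "G" then p + ganado else if i == "E" then p + empate else p) acc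
      = acc + ganado * PySem.List.count lista "G" + empate * PySem.List.count lista "E" := by
  induction lista generalizing acc with
  | nil => simp [PySem.List.count]
  | cons h t ih =>
    simp only [List.foldl_cons, ih, PySem.List.count]
    by_cases hG : h == "G" <;> by_cases hE : h == "E" <;>
      simp_all <;> ring

theorem puntaje_spec : Claim_equal_puntaje := by
  intro lista ganado empate _
  unfold Spec_puntaje puntaje puntaje_alt
  rw [puntaje_step]
  ring
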